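-- pv_equiv track=rewrite | github.com/VirajSanda/football_poster | backend/scraper.py | _remove_all_duplicates
-- ===== SOURCE A (Python) =====
-- from typing import List, Dict
--
-- def _remove_all_duplicates(articles: List[Dict]) -> List[Dict]:
--     """Remove duplicates by URL and title similarity"""
--     seen_urls = set()
--     seen_titles = set()
--     unique_articles = []
--
--     for article in articles:
--         url = article.get("url", "")
--         title = article.get("title", "").lower().strip()
--
--         # Check both exact URL and title similarity
--         is_duplicate = False
--
--         # Check URL
--         if url in seen_urls:
--             is_duplicate = True
--
--         # Check title similarity (first 5 words)
--         title_words = set(title.split()[:5])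
--         for seen_title in seen_titles:
--             seen_words = set(seen_title.split()[:5])
--             common_words = title_words.intersection(seen_words)
--             if len(common_words) >= 3:  # 3+ common words in first 5
--                 is_duplicate = True
--                 break
--
--         if not is_duplicate:
--             seen_urls.add(url)
--             seen_titles.add(title)
--             unique_articles.append(article)
--
--     return unique_articles
-- ===== SOURCE B (Python) =====
-- from typing import List, Dict
-- from itertools import combinations
--
--
-- def _remove_all_duplicates(articles: List[Dict]) -> List[Dict]:
--     """Remove duplicates by URL and title word overlap, via a triple index.
--
--     A stateful filter: instead of comparing each new title against every
--     previously kept title, keep a hash set of all 3-element subsets of each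
--     kept title's first-5-word set; a new title overlaps some kept title in
--     >= 3 of its first 5 words iff one of its own word triples is indexed.
--     """
--     seen_urls = set()
--     triple_index = set()
--
--     def keep(article):
--         url = article.get("url", "")
--         words = sorted(set(article.get("title", "").lower().strip().split()[:5]))
--         triples = list(combinations(words, 3))
--         if url in seen_urls or any(t in triple_index for t in triples):
--             return False
--         seen_urls.add(url)
--         triple_index.update(triples)
--         return True
--
--     return [a for a in articles if keep(a)]
-- ===== Notes on version B (the rewrite author's own statement) =====
-- stated objective: alternative
-- what changed: Replaces A's inner scan comparing each new title against every previously kept title by a stateful filter over a hash-set index of all 3-element subsets of each kept title's first-5-word set, so each article is decided by at most 10 set probes.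
import Mathlib
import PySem

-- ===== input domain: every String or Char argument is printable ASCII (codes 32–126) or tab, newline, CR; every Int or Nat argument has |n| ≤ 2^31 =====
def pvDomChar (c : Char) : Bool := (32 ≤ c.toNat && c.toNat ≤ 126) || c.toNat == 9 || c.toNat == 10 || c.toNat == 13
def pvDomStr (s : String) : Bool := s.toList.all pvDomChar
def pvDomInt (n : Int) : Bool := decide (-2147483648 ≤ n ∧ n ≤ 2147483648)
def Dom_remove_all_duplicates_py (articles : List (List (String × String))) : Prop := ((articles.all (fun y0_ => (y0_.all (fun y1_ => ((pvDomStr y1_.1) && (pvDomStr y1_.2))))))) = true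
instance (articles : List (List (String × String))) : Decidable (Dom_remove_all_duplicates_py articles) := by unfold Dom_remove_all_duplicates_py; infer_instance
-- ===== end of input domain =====

-- B replaces A's pairwise scan over all previously kept titles by a stateful
-- filter probing a set of the 3-element subsets of each kept title's
-- first-5-word set (objective: alternative).

-- ===== PORT A =====
-- article.get(k, dflt): first-match lookup in the association list
def pvGet (a : List (String × String)) (k dflt : String) : String :=
  match a.find? (fun p => p.1 == k) with
  | some p => p.2
  | none => dflt

-- set(title.split()[:5])
def pvWords (t : String) : PySem.Set String :=
  PySem.Set.ofList (PySem.List.slice (PySem.Str.split₀ t) none (some 5))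

-- the inner 'for seen_title in seen_titles: … break' loop
def pvAInner (tw : PySem.Set String) : List String → Bool
  | [] => false
  | st :: rest =>
      if 3 ≤ PySem.Set.len (PySem.Set.inter tw (pvWords st)) then true
      else pvAInner tw rest

def pvAStep (st : PySem.Set String × PySem.Set String × List (List (String × String)))
    (article : List (String × String)) :
    PySem.Set String × PySem.Set String × List (List (String × String)) :=
  let url := pvGet article "url" ""
  let title := PySem.Str.strip (PySem.Str.lower (pvGet article "title" ""))
  let isDup := PySem.Set.contains st.1 url || pvAInner (pvWords title) st.2.1
  if isDup then st
  else (PySem.Set.add st.1 url, PySem.Set.add st.2.1 title, st.2.2 ++ [article])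

def remove_all_duplicates_py (articles : List (List (String × String))) : List (List (String × String)) :=
  (articles.foldl pvAStep (PySem.Set.empty, PySem.Set.empty, [])).2.2

-- ===== PORT B =====
-- list(combinations(sorted(set(title.split()[:5])), 3))
-- (itertools.combinations of a strictly sorted list ported as Mathlib's sublistsLen)
def pvTriples (t : String) : List (List String) :=
  List.sublistsLen 3
    (PySem.List.sorted
      (PySem.Set.ofList (PySem.List.slice (PySem.Str.split₀ t) none (some 5)))
      (fun x => x) false)

-- the stateful filter '[a for a in articles if keep(a)]': structural recursion
-- threading (seen_urls, triple_index), keeping an article by consing it on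
def pvDedup (urls : PySem.Set String) (idx : PySem.Set (List String)) :
    List (List (String × String)) → List (List (String × String))
  | [] => []
  | a :: rest =>
    let url := PySem.Dict.getD (PySem.Dict.mk a) "url" ""
    let trs := pvTriples (PySem.Str.strip (PySem.Str.lower (PySem.Dict.getD (PySem.Dict.mk a) "title" "")))
    if PySem.Set.contains urls url || trs.any (fun t => PySem.Set.contains idx t) then
      pvDedup urls idx rest
    else
      a :: pvDedup (PySem.Set.add urls url) (PySem.Set.update idx trs) rest

def remove_all_duplicates_py_alt (articles : List (List (String × String))) : List (List (String × String)) :=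
  pvDedup PySem.Set.empty PySem.Set.empty articles

-- ===== PRECONDITION & SPEC =====
def Spec_remove_all_duplicates_py (articles : List (List (String × String))) (out : List (List (String × String))) : Prop := out = remove_all_duplicates_py_alt articles
instance (articles : List (List (String × String))) (out : List (List (String × String))) : Decidable (Spec_remove_all_duplicates_py articles out) := by unfold Spec_remove_all_duplicates_py; infer_instance

-- ===== CLAIM (what is proved, stated in full; the proofs are below) =====
def Claim_equal_remove_all_duplicates_py : Prop := ∀ (articles : List (List (String × String))), Dom_remove_all_duplicates_py articles → Spec_remove_all_duplicates_py articles (remove_all_duplicates_py articles)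

-- ===== LEMMAS AND PROOFS =====

-- the two ports' dict lookups agree
theorem pvGet_eq_getD (a : List (String × String)) (k dflt : String) :
    pvGet a k dflt = PySem.Dict.getD (PySem.Dict.mk a) k dflt := by
  cases h : a.find? (fun p => p.1 == k) <;>
    simp [pvGet, PySem.Dict.getD, PySem.Dict.get?, h]

-- sorted(set(title.split()[:5])) as B computes it
def pvCanon (t : String) : List String :=
  PySem.List.sorted (pvWords t) (fun x => x) false

theorem pvTriples_eq (t : String) : pvTriples t = List.sublistsLen 3 (pvCanon t) := rfl

-- the relation between A's set of seen titles and B's triple index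
def pvRel (T : PySem.Set String) (I : PySem.Set (List String)) : Prop :=
  ∀ x, x ∈ I ↔ ∃ t ∈ T, x ∈ pvTriples t

theorem pvWords_nodup (t : String) : (pvWords t).Nodup := by
  unfold pvWords; exact PySem.Set.nodup_ofList _

theorem pvCanon_pairwise_lt (t : String) : (pvCanon t).Pairwise (· < ·) := by
  unfold pvCanon pvWords
  exact PySem.List.sorted_ofList_pairwise_lt _

theorem mem_pvCanon {a : String} {t : String} : a ∈ pvCanon t ↔ a ∈ pvWords t := by
  unfold pvCanon
  exact PySem.List.mem_sorted _ _ _ _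

-- a strictly sorted list of elements of a strictly sorted list is a sublist of it
theorem pv_sublist_of_subset {α : Type} [LinearOrder α] :
    ∀ (l x : List α), l.Pairwise (· < ·) → x.Pairwise (· < ·) → x ⊆ l → List.Sublist x l := by
  intro l
  induction l with
  | nil =>
    intro x _ _ hsub
    have : x = [] := List.eq_nil_iff_forall_not_mem.mpr (fun a ha => by simpa using hsub ha)
    simp [this]
  | cons a l ih =>
    intro x hl hx hsub
    cases x with
    | nil => exact List.nil_sublist _
    | cons b x' =>
      have hbl : b ∈ a :: l := hsub (List.mem_cons_self)
      by_cases hba : b = a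
      · subst hba
        have hx'l : x' ⊆ l := by
          intro c hc
          have hcm : c ∈ b :: l := hsub (List.mem_cons_of_mem _ hc)
          have hbc : b < c := (List.pairwise_cons.mp hx).1 c hc
          rcases List.mem_cons.mp hcm with h | h
          · exact absurd h.symm (ne_of_lt hbc)
          · exact h
        exact List.Sublist.cons₂ b (ih x' (List.pairwise_cons.mp hl).2 (List.pairwise_cons.mp hx).2 hx'l)
      · have hbl' : b ∈ l := by
          rcases List.mem_cons.mp hbl with h | h
          · exact absurd h hba
          · exact h
        have hab : a < b := (List.pairwise_cons.mp hl).1 b hbl'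
        have hxl : b :: x' ⊆ l := by
          intro c hc
          rcases List.mem_cons.mp hc with h | h
          · exact h ▸ hbl'
          · have hbc : b < c := (List.pairwise_cons.mp hx).1 c h
            have hcm : c ∈ a :: l := hsub (List.mem_cons_of_mem _ h)
            rcases List.mem_cons.mp hcm with h2 | h2
            · exact absurd h2.symm (ne_of_lt (lt_trans hab hbc))
            · exact h2
        exact List.Sublist.cons a (ih (b :: x') (List.pairwise_cons.mp hl).2 hx hxl)

-- the combinatorial core: ≥3 common first-5 words ↔ a common word triple
theorem pv_core (t s : String) :
    3 ≤ PySem.Set.len (PySem.Set.inter (pvWords t) (pvWords s)) ↔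
      ∃ x ∈ pvTriples t, x ∈ pvTriples s := by
  rw [pvTriples_eq, pvTriples_eq]
  constructor
  · intro h3
    set L := PySem.Set.inter (pvWords t) (pvWords s) with hLdef
    have hlen : 3 ≤ L.length := by
      simpa [PySem.Set.len] using h3
    have hLnd : L.Nodup := PySem.Set.nodup_inter _ _ (pvWords_nodup t)
    set M := PySem.List.sorted L (fun x => x) false with hMdef
    have hMperm : M.Perm L := PySem.List.sorted_perm L _ _
    have hMnd : M.Nodup := hMperm.nodup_iff.mpr hLnd
    have hMlt : M.Pairwise (· < ·) :=
      (hMnd.and (PySem.List.sorted_pairwise L (fun x => x))).imp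
        (fun h => lt_of_le_of_ne h.2 h.1)
    have hxlt : (M.take 3).Pairwise (· < ·) := hMlt.sublist (List.take_sublist 3 M)
    have hxlen : (M.take 3).length = 3 := by
      rw [List.length_take]
      have := hMperm.length_eq
      omega
    have hsubL : M.take 3 ⊆ L := fun c hc => hMperm.mem_iff.mp (List.take_subset _ _ hc)
    have hsubT : List.Sublist (M.take 3) (pvCanon t) :=
      pv_sublist_of_subset _ _ (pvCanon_pairwise_lt t) hxlt
        (fun c hc => mem_pvCanon.mpr ((PySem.Set.mem_inter _ _ _).mp (hsubL hc)).1)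
    have hsubS : List.Sublist (M.take 3) (pvCanon s) :=
      pv_sublist_of_subset _ _ (pvCanon_pairwise_lt s) hxlt
        (fun c hc => mem_pvCanon.mpr ((PySem.Set.mem_inter _ _ _).mp (hsubL hc)).2)
    exact ⟨M.take 3, List.mem_sublistsLen.mpr ⟨hsubT, hxlen⟩,
      List.mem_sublistsLen.mpr ⟨hsubS, hxlen⟩⟩
  · rintro ⟨x, hxt, hxs⟩
    rw [List.mem_sublistsLen] at hxt hxs
    have hxnd : x.Nodup := List.Nodup.sublist hxt.1 ((pvCanon_pairwise_lt t).imp ne_of_lt)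
    have hsubL : x ⊆ PySem.Set.inter (pvWords t) (pvWords s) := fun c hc =>
      (PySem.Set.mem_inter _ _ _).mpr
        ⟨mem_pvCanon.mp (hxt.1.subset hc), mem_pvCanon.mp (hxs.1.subset hc)⟩
    have hle := (hxnd.subperm hsubL).length_le
    rw [hxt.2] at hle
    simpa [PySem.Set.len] using hle

-- A's inner loop is the existence of a seen title with ≥3 common words
theorem pvAInner_iff (tw : PySem.Set String) (T : List String) :
    pvAInner tw T = true ↔ ∃ st ∈ T, 3 ≤ PySem.Set.len (PySem.Set.inter tw (pvWords st)) := by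
  induction T with
  | nil => simp [pvAInner]
  | cons a T ih =>
    by_cases h : 3 ≤ PySem.Set.len (PySem.Set.inter tw (pvWords a))
    · simp only [pvAInner, if_pos h]
      exact ⟨fun _ => ⟨a, List.mem_cons_self, h⟩, fun _ => trivial⟩
    · simp only [pvAInner, if_neg h, ih]
      constructor
      · rintro ⟨st, hst, h3⟩; exact ⟨st, List.mem_cons_of_mem _ hst, h3⟩
      · rintro ⟨st, hst, h3⟩
        rcases List.mem_cons.mp hst with rfl | hst'
        · exact absurd h3 h
        · exact ⟨st, hst', h3⟩

-- under pvRel, B's index probe decides exactly A's inner loop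
theorem pv_decision_eq {T : PySem.Set String} {I : PySem.Set (List String)} (hrel : pvRel T I)
    (title : String) :
    (pvTriples title).any (fun x => PySem.Set.contains I x) = pvAInner (pvWords title) T := by
  rw [Bool.eq_iff_iff]
  rw [pvAInner_iff, List.any_eq_true]
  constructor
  · rintro ⟨x, hx, hxI⟩
    rcases (hrel x).mp (PySem.Set.contains_iff I x |>.mp hxI) with ⟨st, hst, hxt⟩
    exact ⟨st, hst, (pv_core title st).mpr ⟨x, hx, hxt⟩⟩
  · rintro ⟨st, hst, h3⟩
    rcases (pv_core title st).mp h3 with ⟨x, hx, hxt⟩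
    exact ⟨x, hx, (PySem.Set.contains_iff I x).mpr ((hrel x).mpr ⟨st, hst, hxt⟩)⟩

theorem pv_fold_eq : ∀ (arts : List (List (String × String)))
    (U : PySem.Set String) (T : PySem.Set String) (I : PySem.Set (List String))
    (O : List (List (String × String))), pvRel T I →
    (arts.foldl pvAStep (U, T, O)).2.2 = O ++ pvDedup U I arts := by
  intro arts
  induction arts with
  | nil => intro U T I O _; simp [pvDedup]
  | cons a arts ih =>
    intro U T I O hrel
    have hdec := pv_decision_eq hrel (PySem.Str.strip (PySem.Str.lower (pvGet a "title" "")))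
    simp only [List.foldl_cons, pvAStep, pvDedup, ← pvGet_eq_getD, ← hdec]
    cases hd : (PySem.Set.contains U (pvGet a "url" "") || (pvTriples (PySem.Str.strip (PySem.Str.lower (pvGet a "title" "")))).any (fun x => PySem.Set.contains I x)) with
    | true =>
      simp only [if_pos]
      exact ih U T I O hrel
    | false =>
      simp only [Bool.false_eq_true, if_false]
      rw [ih _ _ _ _ (by
        intro x
        rw [PySem.Set.mem_update]
        constructor
        · rintro (hxI | hxt)
          · rcases (hrel x).mp hxI with ⟨st, hst, hx⟩
            exact ⟨st, (PySem.Set.mem_add _ _ _).mpr (Or.inl hst), hx⟩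
          · exact ⟨_, (PySem.Set.mem_add _ _ _).mpr (Or.inr rfl), hxt⟩
        · rintro ⟨st, hst, hx⟩
          rcases (PySem.Set.mem_add _ _ _).mp hst with h | h
          · exact Or.inl ((hrel x).mpr ⟨st, h, hx⟩)
          · exact Or.inr (h ▸ hx))]
      simp

-- ===== VERDICT (by name: the statement is the Claim_ definition above) =====
theorem remove_all_duplicates_py_spec : Claim_equal_remove_all_duplicates_py := by
  intro articles _
  unfold Spec_remove_all_duplicates_py remove_all_duplicates_py remove_all_duplicates_py_alt
  have hrel0 : pvRel PySem.Set.empty PySem.Set.empty := by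
    intro x
    unfold PySem.Set.empty
    constructor
    · intro h; cases h
    · rintro ⟨t, ht, -⟩; cases ht
  simpa using pv_fold_eq articles _ _ _ [] hrel0
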